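-- pv_equiv track=rewrite | github.com/peter-as/advent-of-code | 2024/01.py | count_a_in_b
-- ===== SOURCE A (Python) =====
-- def count_a_in_b(a: list[int], b: list[int]):
--     """Calculate a weighted count of how often elements of the first column appear in the second column
--
--     Args:
--         a: First list of integers
--         b: Second list of integers
--
--     Returns:
--         The sum over all elements of the first column
--
--     """
--     occur = {}
--     for i in b:
--         if i in occur:
--             occur[i] += 1
--         else:
--             occur[i] = 1
--     sum = 0
--     for i in a:
--         if i in occur:
--             sum += i * occur[i]
--     return sum
-- ===== SOURCE B (Python) =====
-- def count_a_in_b(a: list[int], b: list[int]):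
--     # Group by value: each distinct value v of b contributes v once per
--     # (occurrence in a) x (occurrence in b); values of a absent from b add 0.
--     return sum(v * a.count(v) * b.count(v) for v in set(b))
-- ===== Notes on version B (the rewrite author's own statement) =====
-- stated objective: alternative
-- what changed: Instead of building a frequency dict of b and scanning a with guarded lookups, B sums over the distinct values of set(b), adding v * a.count(v) * b.count(v) for each, grouping equal elements of a by value rather than visiting them one by one.
import Mathlib
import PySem

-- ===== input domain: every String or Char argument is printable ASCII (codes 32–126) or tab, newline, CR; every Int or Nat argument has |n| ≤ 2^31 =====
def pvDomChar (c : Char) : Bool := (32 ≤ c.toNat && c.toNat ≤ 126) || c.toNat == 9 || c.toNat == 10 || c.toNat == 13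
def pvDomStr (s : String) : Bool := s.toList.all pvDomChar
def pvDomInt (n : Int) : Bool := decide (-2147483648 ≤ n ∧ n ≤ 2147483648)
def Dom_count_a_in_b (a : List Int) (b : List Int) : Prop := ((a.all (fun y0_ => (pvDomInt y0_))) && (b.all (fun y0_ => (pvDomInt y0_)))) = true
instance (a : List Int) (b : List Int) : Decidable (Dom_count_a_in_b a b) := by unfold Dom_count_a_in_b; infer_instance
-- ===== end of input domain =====

-- B replaces A's per-element pass over a with a frequency dict of b by a sum over the
-- distinct values of set(b), adding v * a.count(v) * b.count(v) per value (alternative, not faster).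

-- ===== PORT A =====
def count_a_in_b (a : List Int) (b : List Int) : Int :=
  let occur : PySem.Dict Int Int :=
    b.foldl (fun occur i =>
      if occur.contains i then occur.insert i (occur.getD i 0 + 1)
      else occur.insert i 1) PySem.Dict.empty
  a.foldl (fun sum i =>
    if occur.contains i then sum + i * occur.getD i 0 else sum) 0

-- ===== PORT B =====
-- sum over set(b); the total is order-independent, so summing the PySem.Set's elements is exact
def count_a_in_b_alt (a : List Int) (b : List Int) : Int :=
  ((PySem.Set.ofList b).map (fun v => v * (a.count v : Int) * (b.count v : Int))).sum

-- ===== PRECONDITION & SPEC =====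
def Spec_count_a_in_b (a : List Int) (b : List Int) (out : Int) : Prop := out = count_a_in_b_alt a b
instance (a : List Int) (b : List Int) (out : Int) : Decidable (Spec_count_a_in_b a b out) := by unfold Spec_count_a_in_b; infer_instance

-- ===== CLAIM (what is proved, stated in full; the proofs are below) =====
def Claim_equal_count_a_in_b : Prop := ∀ (a : List Int) (b : List Int), Dom_count_a_in_b a b → Spec_count_a_in_b a b (count_a_in_b a b)

-- ===== LEMMAS AND PROOFS =====

-- A's guarded update is the standard counter update (when the key is absent getD gives 0, so insert i 1 = insert i (0+1)).
theorem occur_eq_counter (b : List Int) :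
    b.foldl (fun (occur : PySem.Dict Int Int) i =>
      if occur.contains i then occur.insert i (occur.getD i 0 + 1)
      else occur.insert i 1) PySem.Dict.empty
    = b.foldl (fun (occur : PySem.Dict Int Int) i =>
        occur.insert i (occur.getD i 0 + 1)) PySem.Dict.empty := by
  apply PySem.List.foldl_congr_mem
  intro d x _
  by_cases h : d.contains x = true
  · simp [h]
  · have h0 : d.getD x 0 = 0 := PySem.Dict.getD_of_not_contains d 0 (by simpa using h)
    simp [h, h0]

theorem foldl_add_map_sum (f : Int → Int) (l : List Int) (acc : Int) :
    l.foldl (fun s i => s + f i) acc = acc + (l.map f).sum := by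
  induction l generalizing acc with
  | nil => simp
  | cons x xs ih => simp [List.foldl, ih]; ring

-- A's value as a per-element sum over a
theorem count_a_eq_map_sum (a b : List Int) :
    count_a_in_b a b = (a.map (fun i => i * (b.count i : Int))).sum := by
  unfold count_a_in_b
  rw [occur_eq_counter, PySem.Dict.foldl_insert_getD_add_one_eq_counter]
  have hstep : ∀ (s : Int) (i : Int), i ∈ a →
      (if (PySem.Dict.counter b).contains i = true then s + i * (PySem.Dict.counter b).getD i 0 else s)
      = s + i * (b.count i : Int) := by
    intro s i _
    by_cases h : (PySem.Dict.counter b).contains i = true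
    · simp [h, PySem.Dict.getD_counter]
    · have hx : i ∉ b := fun hm => h (by simpa [PySem.Dict.contains_counter] using hm)
      simp [h, List.count_eq_zero_of_not_mem hx]
  show List.foldl _ 0 a = _
  rw [PySem.List.foldl_congr_mem a _ (fun (s : Int) (i : Int) => s + i * (b.count i : Int)) (0 : Int) hstep,
      foldl_add_map_sum]
  simp

-- grouping identity: summing i * count_b i over the elements of a equals summing
-- v * count_a v * count_b v over the distinct values of b
theorem group_by_value (a b : List Int) :
    (a.map (fun i => i * (b.count i : Int))).sum
      = ((PySem.Set.ofList b).map (fun v => v * (a.count v : Int) * (b.count v : Int))).sum := by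
  have hto : (PySem.Set.ofList b : List Int).toFinset = b.toFinset := by
    apply Finset.ext
    intro x
    simp [List.mem_toFinset, PySem.Set.mem_ofList]
  rw [← List.sum_toFinset _ (PySem.Set.nodup_ofList b), hto]
  rw [Finset.sum_list_map_count]
  have h1 : ∑ v ∈ a.toFinset, a.count v • (v * (b.count v : Int))
      = ∑ v ∈ a.toFinset ∪ b.toFinset, a.count v • (v * (b.count v : Int)) := by
    apply Finset.sum_subset Finset.subset_union_left
    intro x _ hx
    have : a.count x = 0 := by
      simpa [List.count_eq_zero] using fun hm => hx (List.mem_toFinset.mpr hm)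
    simp [this]
  have h2 : ∑ v ∈ b.toFinset, (v * (a.count v : Int) * (b.count v : Int))
      = ∑ v ∈ a.toFinset ∪ b.toFinset, (v * (a.count v : Int) * (b.count v : Int)) := by
    apply Finset.sum_subset Finset.subset_union_right
    intro x _ hx
    have : b.count x = 0 := by
      simpa [List.count_eq_zero] using fun hm => hx (List.mem_toFinset.mpr hm)
    simp [this]
  rw [h1, h2]
  apply Finset.sum_congr rfl
  intro x _
  simp
  ring

-- ===== VERDICT (by name: the statement is the Claim_ definition above) =====
theorem count_a_in_b_spec : Claim_equal_count_a_in_b := by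
  intro a b _
  unfold Spec_count_a_in_b count_a_in_b_alt
  rw [count_a_eq_map_sum, group_by_value]
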